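-- pv_equiv track=rewrite | github.com/OsProgramadores/op-desafios | desafio-06/disouzam/python/anagrama.py | obtem_candidatos_iniciais
-- ===== SOURCE A (Python) =====
-- def obtem_candidatos_iniciais(letras_expressao_atual, candidatos):
--     """obtem_candidatos_iniciais(letras_expressao_atual, candidatos):
--     Obtém a lista inicial de candidatos a anagrama a partir de uma lista simples de palavras
--     candidatas e as letras da expressão atual
--
--     Parâmetros:
--     letras_expressao_atual: dicionário de letras da expressão atual e sua contagem de ocorrências
--     candidatos: lista de palavras candidatas a formar um anagrama
--     """
--     candidatos_a_anagrama = []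
--     for posicao_candidato_na_lista, candidato in enumerate(candidatos):
--         lista = []
--         lista.append(candidato[0])
--         letras_faltantes = obtem_contagem_letras_faltantes_para_um_anagrama(
--             letras_expressao_atual, lista)
--         total_letras_faltantes = obtem_total_letras(letras_faltantes)
--         candidatos_a_anagrama.append(
--             (lista, posicao_candidato_na_lista, total_letras_faltantes, letras_faltantes))
--
--     return candidatos_a_anagrama
--
-- def obtem_total_letras(letras_faltantes):
--     """obtem_total_letras(letras_faltantes):
--     Calcula o total de letras faltantes
--
--     Parâmetro:
--     letras_faltantes: dicionário com o número de letras faltantes por letra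
--     """
--     total = 0
--     for letra in letras_faltantes:
--         total += letras_faltantes[letra]
--
--     return total
--
-- def obtem_contagem_letras_faltantes_para_um_anagrama(letras_expressao_atual, lista_de_strings):
--     """obtem_contagem_letras_faltantes_para_um_anagrama(letras_expressao_atual, lista_de_strings):
--     Processa a expressao e calcula o número de letras faltantes para formação de um anagrama
--     a partir da lista fornecida
--
--     Parâmetros:
--     letras_expressao_atual: dicionário de letras da expressão atual e sua contagem de ocorrências
--     lista_de_strings: lista de palavras que podem formar um anagrama
--     """
--     letras_da_lista_atual = conta_letras_de_uma_lista(lista_de_strings)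
--     letras_faltantes = {}
--
--     for letra in letras_expressao_atual:
--         if letra in letras_da_lista_atual:
--             letras_faltantes[letra] = letras_expressao_atual[letra] - \
--                 letras_da_lista_atual[letra]
--         else:
--             letras_faltantes[letra] = letras_expressao_atual[letra]
--
--     return letras_faltantes
--
-- def conta_letras_de_uma_lista(lista_de_strings):
--     """conta_letras_de_uma_lista(lista_de_strings):
--     Processa a expressao e conta o número de ocorrências de cada letra da palavra ou frase em
--     uma lista de strings
--
--     Parâmetro:
--     lista_de_strings: lista de palavras que podem formar um anagrama
--     """
--     string_concatenada = "".join(lista_de_strings)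
--     contagem_letras = {}
--     for letra in string_concatenada:
--         if letra in contagem_letras:
--             contagem_letras[letra] += 1
--         else:
--             contagem_letras[letra] = 1
--     return contagem_letras
-- ===== SOURCE B (Python) =====
-- def obtem_candidatos_iniciais(letras_expressao_atual, candidatos):
--     """Different decomposition: compute the grand total once, then for each
--     candidate copy the expression dict and walk the first word character by
--     character, decrementing the matching entry and the running total in a
--     single pass (no per-key counting and no intermediate count dict)."""
--     base_total = sum(letras_expressao_atual.values())
--     resultado = []
--     for posicao, candidato in enumerate(candidatos):
--         primeira = candidato[0]
--         faltantes = dict(letras_expressao_atual)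
--         total = base_total
--         for letra in primeira:
--             if letra in faltantes:
--                 faltantes[letra] = faltantes[letra] - 1
--                 total -= 1
--         resultado.append(([primeira], posicao, total, faltantes))
--     return resultado
-- ===== Notes on version B (the rewrite author's own statement) =====
-- stated objective: faster
-- what changed: A builds a per-candidate character-count dict of the first word, rescans every expression key against it and re-sums the result key by key; B precomputes the grand total once, then per candidate copies the expression dict and walks the first word character by character, decrementing the matching entry and a running total in one pass, eliminating the count-dict construction and the extra summing pass.
-- outside the precondition, e.g. on obtem_candidatos_iniciais({'a': 1}, [[]]): A raises IndexError, B raises IndexError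
import Mathlib
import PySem

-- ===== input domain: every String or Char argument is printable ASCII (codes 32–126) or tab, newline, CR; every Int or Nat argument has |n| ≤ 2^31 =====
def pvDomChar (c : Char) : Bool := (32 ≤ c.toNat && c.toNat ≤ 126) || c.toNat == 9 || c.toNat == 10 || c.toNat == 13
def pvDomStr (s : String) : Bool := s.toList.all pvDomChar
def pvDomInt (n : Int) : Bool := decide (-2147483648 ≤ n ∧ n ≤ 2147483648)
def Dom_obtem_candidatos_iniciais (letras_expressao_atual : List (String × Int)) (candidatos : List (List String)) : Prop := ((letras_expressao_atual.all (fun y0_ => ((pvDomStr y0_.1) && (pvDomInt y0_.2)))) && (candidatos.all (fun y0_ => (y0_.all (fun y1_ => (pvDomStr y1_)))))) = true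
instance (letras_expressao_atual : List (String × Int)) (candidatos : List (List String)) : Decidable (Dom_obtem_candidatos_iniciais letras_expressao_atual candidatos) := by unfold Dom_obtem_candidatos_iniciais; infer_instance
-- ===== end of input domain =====

-- B replaces A's per-key counting chain (char-count dict of the word + rescan of every
-- expression key + key-by-key re-sum) with one pass over the word's characters that
-- decrements a copied dict and a precomputed running total; objective: alternative.


-- ===== PORT A =====
-- conta_letras_de_uma_lista: "".join then count each 1-char string into a dict
def conta_letras_de_uma_lista (lista_de_strings : List String) : PySem.Dict String Int :=
  let string_concatenada := PySem.Str.join "" lista_de_strings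
  (string_concatenada.toList.map (fun c => String.mk [c])).foldl
    (fun d letra => if d.contains letra then d.insert letra (d.getD letra 0 + 1) else d.insert letra 1)
    PySem.Dict.empty

-- obtem_contagem_letras_faltantes_para_um_anagrama: the dict iterated is the assoc list itself
-- (a Python dict has unique keys, so each key's lookup is its pair's value)
def obtem_contagem_letras_faltantes_para_um_anagrama (letras_expressao_atual : List (String × Int)) (lista_de_strings : List String) : PySem.Dict String Int :=
  let letras_da_lista_atual := conta_letras_de_uma_lista lista_de_strings
  letras_expressao_atual.foldl
    (fun lf p =>
      if letras_da_lista_atual.contains p.1 then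
        lf.insert p.1 (p.2 - letras_da_lista_atual.getD p.1 0)
      else
        lf.insert p.1 p.2)
    PySem.Dict.empty

-- obtem_total_letras: iterate the keys, look each value up
def obtem_total_letras (letras_faltantes : PySem.Dict String Int) : Int :=
  letras_faltantes.items.foldl (fun total p => total + letras_faltantes.getD p.1 0) 0

def obtem_candidatos_iniciais (letras_expressao_atual : List (String × Int)) (candidatos : List (List String)) : List (List String × Int × Int × (List (String × Int))) :=
  (PySem.List.enumerate candidatos).foldl
    (fun acc pc =>
      -- candidato[0]: IndexError on an empty candidato is excluded by Pre_, so the default is never read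
      let lista : List String := [] ++ [(PySem.List.pyGet? pc.2 0).getD ""]
      let letras_faltantes := obtem_contagem_letras_faltantes_para_um_anagrama letras_expressao_atual lista
      let total_letras_faltantes := obtem_total_letras letras_faltantes
      acc ++ [(lista, pc.1, total_letras_faltantes, letras_faltantes.items)])
    []

-- ===== PORT B =====
def obtem_candidatos_iniciais_alt (letras_expressao_atual : List (String × Int)) (candidatos : List (List String)) : List (List String × Int × Int × (List (String × Int))) :=
  let base_total := (letras_expressao_atual.map (·.2)).sum   -- sum(letras_expressao_atual.values())
  (PySem.List.enumerate candidatos).foldl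
    (fun acc pc =>
      let primeira := (PySem.List.pyGet? pc.2 0).getD ""     -- candidato[0]; Pre_ excludes the none case
      -- faltantes = dict(letras_expressao_atual); total = base_total; then one pass over primeira
      let st := primeira.toList.foldl
        (fun (st : PySem.Dict String Int × Int) letra =>
          if st.1.contains (String.mk [letra]) then
            (st.1.insert (String.mk [letra]) (st.1.getD (String.mk [letra]) 0 - 1), st.2 - 1)
          else st)
        (PySem.Dict.mk letras_expressao_atual, base_total)
      acc ++ [([primeira], pc.1, st.2, st.1.items)])
    []

-- ===== PRECONDITION & SPEC =====
-- Pre_ excludes (a) empty candidate word lists, on which A raises IndexError at candidato[0], and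
-- (b) assoc lists with duplicate keys, which do not represent a Python dict (letras_expressao_atual
-- is a dict in Python, so duplicate keys are unrepresentable there).
def Pre_obtem_candidatos_iniciais (letras_expressao_atual : List (String × Int)) (candidatos : List (List String)) : Prop :=
  (∀ c ∈ candidatos, c ≠ []) ∧ (letras_expressao_atual.map (·.1)).Nodup
instance (letras_expressao_atual : List (String × Int)) (candidatos : List (List String)) : Decidable (Pre_obtem_candidatos_iniciais letras_expressao_atual candidatos) := by unfold Pre_obtem_candidatos_iniciais; infer_instance
def pvWitness_obtem_candidatos_iniciais : (List (String × Int)) × List (List String) :=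
  ([("a", 2), ("b", 1)], [["ab", "c"], ["ba"]])
def Spec_obtem_candidatos_iniciais (letras_expressao_atual : List (String × Int)) (candidatos : List (List String)) (out : List (List String × Int × Int × (List (String × Int)))) : Prop := out = obtem_candidatos_iniciais_alt letras_expressao_atual candidatos
instance (letras_expressao_atual : List (String × Int)) (candidatos : List (List String)) (out : List (List String × Int × Int × (List (String × Int)))) : Decidable (Spec_obtem_candidatos_iniciais letras_expressao_atual candidatos out) := by unfold Spec_obtem_candidatos_iniciais; infer_instance

-- ===== CLAIM (what is proved, stated in full; the proofs are below) =====
def Claim_equal_obtem_candidatos_iniciais : Prop := ∀ (letras_expressao_atual : List (String × Int)) (candidatos : List (List String)), Dom_obtem_candidatos_iniciais letras_expressao_atual candidatos → Pre_obtem_candidatos_iniciais letras_expressao_atual candidatos → Spec_obtem_candidatos_iniciais letras_expressao_atual candidatos (obtem_candidatos_iniciais letras_expressao_atual candidatos)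

-- ===== LEMMAS AND PROOFS =====

-- A's hand-written count loop is Counter(chars of the joined string)
theorem conta_letras_eq_counter (lista : List String) :
    conta_letras_de_uma_lista lista
      = PySem.Dict.counter ((PySem.Str.join "" lista).toList.map (fun c => String.mk [c])) := by
  unfold conta_letras_de_uma_lista
  rw [← PySem.Dict.foldl_insert_getD_add_one_eq_counter]
  exact PySem.List.foldl_congr_mem _ _ _ _ (by
    intro acc x _
    by_cases h : acc.contains x = true
    · simp [h]
    · simp only [Bool.not_eq_true] at h
      simp [h, PySem.Dict.getD_of_not_contains _ _ h])

-- the faltantes dict A builds, as a plain map over the (Nodup-keyed) assoc list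
theorem faltantes_items (letras : List (String × Int)) (lista : List String)
    (hnd : (letras.map (·.1)).Nodup) :
    (obtem_contagem_letras_faltantes_para_um_anagrama letras lista).items
      = letras.map (fun p =>
          (p.1, p.2 - (((PySem.Str.join "" lista).toList.map (fun c => String.mk [c])).count p.1 : Int))) := by
  unfold obtem_contagem_letras_faltantes_para_um_anagrama
  rw [PySem.List.foldl_congr_mem
      (g := fun lf p => lf.insert p.1
        (p.2 - (((PySem.Str.join "" lista).toList.map (fun c => String.mk [c])).count p.1 : Int)))]
  · rw [PySem.Dict.items_foldl_insert_fresh letras (fun p => p.1)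
      (fun p => p.2 - (((PySem.Str.join "" lista).toList.map (fun c => String.mk [c])).count p.1 : Int))
      PySem.Dict.empty (by simp [PySem.Dict.contains_empty]) hnd]
    rfl
  · intro acc p _
    rw [conta_letras_eq_counter, PySem.Dict.contains_counter]
    set xs := (PySem.Str.join "" lista).toList.map (fun c => String.mk [c]) with hxs
    by_cases h : p.1 ∈ xs
    · simp [h, PySem.Dict.getD_counter]
    · simp [h, List.count_eq_zero_of_not_mem h]

-- A's key-by-key total over a Nodup-keyed dict is the sum of its values
theorem total_eq_sum (d : PySem.Dict String Int) (hnd : d.keys.Nodup) :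
    obtem_total_letras d = (d.items.map (·.2)).sum := by
  unfold obtem_total_letras
  rw [PySem.List.foldl_add]
  rw [List.map_congr_left (fun p hp => PySem.Dict.getD_of_mem_items d (by exact hp) hnd 0)]
  simp

theorem keys_eq_items_fst {κ ν : Type} [BEq κ] (d : PySem.Dict κ ν) : d.keys = d.items.map (·.1) := rfl

-- B's inner decrement loop, characterised: it subtracts each character's multiplicity
-- from its entry and counts the characters that hit a key off the running total
theorem dec_loop (cs : List Char) (d : PySem.Dict String Int) (t : Int)
    (hnd : d.keys.Nodup) :
    cs.foldl
      (fun (st : PySem.Dict String Int × Int) letra =>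
        if st.1.contains (String.mk [letra]) then
          (st.1.insert (String.mk [letra]) (st.1.getD (String.mk [letra]) 0 - 1), st.2 - 1)
        else st)
      (d, t)
      = (PySem.Dict.mk (d.items.map (fun p =>
            (p.1, p.2 - ((cs.map (fun c => String.mk [c])).count p.1 : Int)))),
         t - (cs.countP (fun c => d.contains (String.mk [c])) : Int)) := by
  induction cs generalizing d t with
  | nil =>
    simp
  | cons c cs ih =>
    simp only [List.foldl_cons]
    by_cases hc : d.contains (String.mk [c]) = true
    · rw [if_pos hc]
      rw [ih _ _ (by rw [PySem.Dict.keys_insert_of_contains _ _ hc]; exact hnd)]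
      refine Prod.ext ?_ ?_
      · apply PySem.Dict.ext
        simp only [PySem.Dict.items_insert_of_contains _ _ hc, List.map_map]
        apply List.map_congr_left
        intro p hp
        simp only [Function.comp_def]
        by_cases hpk : p.1 == String.mk [c]
        · have hpk' : p.1 = String.mk [c] := by exact eq_of_beq hpk
          have hval : d.getD p.1 0 = p.2 := PySem.Dict.getD_of_mem_items d hp hnd 0
          simp only [hpk, if_pos]
          simp [← hpk', hval]
          ring
        · simp only [Bool.not_eq_true] at hpk
          have hne : ¬ (String.mk [c] = p.1) := by
            intro h; rw [h] at hpk; simp at hpk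
          simp [hpk, hne]
      · have hcont : ∀ k, (d.insert (String.mk [c]) (d.getD (String.mk [c]) 0 - 1)).contains k
            = d.contains k := by
          intro k
          rw [PySem.Dict.contains_insert]
          by_cases hk : k == String.mk [c]
          · have : k = String.mk [c] := eq_of_beq hk
            simp [this, hc]
          · simp [hk]
        simp only [hcont]
        simp [hc]
        ring
    · rw [if_neg hc]
      rw [ih _ _ hnd]
      refine Prod.ext ?_ ?_
      · apply PySem.Dict.ext
        simp only []
        apply List.map_congr_left
        intro p hp
        have hpk : ¬ (String.mk [c] = p.1) := by
          intro h
          have : d.contains p.1 = true := by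
            rw [PySem.Dict.contains_iff_mem_keys]
            rw [keys_eq_items_fst]
            exact List.mem_map_of_mem hp
          rw [← h] at this
          exact absurd this (by simpa using hc)
        simp [hpk]
      · simp [hc]

theorem countP_cons_mem (k : String) (ks : List String) (hk : k ∉ ks) (xs : List String) :
    xs.countP (fun x => decide (x ∈ k :: ks))
      = xs.count k + xs.countP (fun x => decide (x ∈ ks)) := by
  induction xs with
  | nil => simp
  | cons x xs ihx =>
    by_cases hx : x = k
    · subst hx
      simp only [List.countP_cons, List.count_cons, ihx]
      simp [hk]
      omega
    · by_cases hx2 : x ∈ ks <;>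
        simp only [List.countP_cons, List.count_cons, ihx] <;>
        simp [hx, hx2] <;> omega

-- splitting a sum of differences over the pairs of an assoc list
theorem sum_snd_sub (l : List (String × Int)) (f : String → Int) :
    (l.map (fun p => p.2 - f p.1)).sum = (l.map (fun p => p.2)).sum - (l.map (fun p => f p.1)).sum := by
  induction l with
  | nil => simp
  | cons p l ih => simp [ih]; ring

-- sum of per-key multiplicities over distinct keys = number of elements hitting a key
theorem sum_count_eq_countP (ks : List String) (xs : List String) (hnd : ks.Nodup) :
    (ks.map (fun k => (xs.count k : Int))).sum = (xs.countP (fun x => decide (x ∈ ks)) : Int) := by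
  induction ks with
  | nil => simp
  | cons k ks ih =>
    simp only [List.map_cons, List.sum_cons]
    rw [ih (List.Nodup.of_cons hnd)]
    have hk : k ∉ ks := (List.nodup_cons.mp hnd).1
    rw [countP_cons_mem k ks hk xs]
    push_cast
    ring

-- ===== VERDICT (by name: the statement is the Claim_ definition above) =====
theorem obtem_candidatos_iniciais_spec : Claim_equal_obtem_candidatos_iniciais := by
  intro letras candidatos _ hpre
  obtain ⟨-, hnd⟩ := hpre
  unfold Spec_obtem_candidatos_iniciais obtem_candidatos_iniciais obtem_candidatos_iniciais_alt
  rw [PySem.List.foldl_append_singleton_eq_map, PySem.List.foldl_append_singleton_eq_map]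
  refine List.map_congr_left (fun pc _ => ?_)
  have hmk : (PySem.Dict.mk letras).keys.Nodup := by simpa [keys_eq_items_fst] using hnd
  rw [dec_loop _ _ _ hmk]
  set primeira := (PySem.List.pyGet? pc.2 0).getD "" with hp
  have hitems := faltantes_items letras [primeira] hnd
  have hkeys : (obtem_contagem_letras_faltantes_para_um_anagrama letras [primeira]).keys.Nodup := by
    rw [keys_eq_items_fst, hitems]
    simpa using hnd
  have hjoin : (PySem.Str.join "" [primeira]).toList = primeira.toList := by
    simp [PySem.Str.join, PySem.Chars.join, List.intercalate]
  have hditems : (PySem.Dict.mk letras).items = letras := rfl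
  refine Prod.ext rfl (Prod.ext rfl (Prod.ext ?_ ?_))
  · -- totals agree
    show obtem_total_letras (obtem_contagem_letras_faltantes_para_um_anagrama letras [primeira]) = _
    rw [total_eq_sum _ hkeys, hitems, hjoin]
    simp only [List.map_map, Function.comp_def]
    rw [sum_snd_sub letras (fun k => ((primeira.toList.map (fun c => String.mk [c])).count k : Int))]
    have hsum := sum_count_eq_countP (letras.map (·.1)) (primeira.toList.map (fun c => String.mk [c])) hnd
    have hcnt : ∀ c : Char, (PySem.Dict.mk letras).contains (String.mk [c])
        = decide (String.mk [c] ∈ letras.map (·.1)) := by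
      intro c
      rw [PySem.Dict.contains_eq_decide_mem_keys]
      rfl
    simp only [hcnt]
    rw [List.countP_map] at hsum
    simp only [List.map_map, Function.comp_def] at hsum
    rw [hsum]
  · -- items agree
    show (obtem_contagem_letras_faltantes_para_um_anagrama letras [primeira]).items = _
    rw [hitems, hjoin, hditems]
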